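-- pv_equiv track=rewrite | github.com/MrBrantCode/unitest_baseline | mut_generate/mist_train_cf/cf_38782/solution.py | min_travel_cost
-- ===== SOURCE A (Python) =====
-- def min_travel_cost(days, flights):
--     num_cities = len(days)
--     num_weeks = len(days[0])
--
--     dp = [[0] * num_cities for _ in range(2)]
--
--     for week in range(num_weeks - 1, -1, -1):
--         for cur_city in range(num_cities):
--             dp[week % 2][cur_city] = days[cur_city][week] + dp[(week + 1) % 2][cur_city]
--             for dest_city in range(num_cities):
--                 if flights[cur_city][dest_city] == 1:
--                     dp[week % 2][cur_city] = max(dp[week % 2][cur_city],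
--                                                  days[dest_city][week] + dp[(week + 1) % 2][dest_city])
--
--     return dp[0][0]
-- ===== SOURCE B (Python) =====
-- def min_travel_cost(days, flights):
--     num_cities = len(days)
--     num_weeks = len(days[0])
--
--     def solve(week):
--         if week < num_weeks:
--             nxt = solve(week + 1)
--             return [max([days[c][week] + nxt[c]] +
--                         [days[d][week] + nxt[d]
--                          for d in range(num_cities) if flights[c][d] == 1])
--                     for c in range(num_cities)]
--         return [0] * num_cities
--
--     return solve(0)[0]
-- ===== Notes on version B (the rewrite author's own statement) =====
-- stated objective: alternative
-- what changed: Replaces A's iterative rolling two-row table with in-place per-cell mutation by a top-down recursion over weeks that rebuilds each week's value row functionally (list comprehension with max over the candidate list); same recurrence, iterative-imperative vs recursive-functional decomposition.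
import Mathlib
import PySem

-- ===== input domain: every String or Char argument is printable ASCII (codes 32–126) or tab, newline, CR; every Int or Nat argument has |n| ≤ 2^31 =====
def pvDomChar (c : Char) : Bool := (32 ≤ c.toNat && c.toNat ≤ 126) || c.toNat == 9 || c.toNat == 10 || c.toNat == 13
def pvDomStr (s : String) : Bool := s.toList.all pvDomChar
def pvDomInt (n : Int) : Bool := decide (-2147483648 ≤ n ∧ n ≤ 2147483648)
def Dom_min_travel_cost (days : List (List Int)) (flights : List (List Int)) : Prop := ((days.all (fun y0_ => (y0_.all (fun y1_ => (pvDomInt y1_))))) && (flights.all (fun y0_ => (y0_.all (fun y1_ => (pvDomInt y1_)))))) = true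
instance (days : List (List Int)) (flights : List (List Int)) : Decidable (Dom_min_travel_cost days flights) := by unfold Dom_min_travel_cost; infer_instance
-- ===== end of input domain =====

-- B replaces A's in-place rolling two-row DP table by a top-down recursion over weeks that
-- rebuilds each week's value row functionally; same recurrence, different decomposition (no speed claim).

-- ===== PORT A =====
-- All list indices reached by A under Pre_min_travel_cost are in range, so the in-range
-- accessors getD/set are exact transliterations of Python's indexing/assignment there.

-- inner 'for dest_city' loop body of A, folding over the dest list; p = week % 2, q = (week+1) % 2
def aInner (days flights : List (List Int)) (week p q c : Nat) (dp : List (List Int)) (l : List Nat) : List (List Int) :=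
  List.foldl (fun dp d =>
    if (flights.getD c []).getD d 0 == 1 then
      dp.set p ((dp.getD p []).set c
        (max ((dp.getD p []).getD c 0)
             ((days.getD d []).getD week 0 + (dp.getD q []).getD d 0)))
    else dp) dp l

-- body of A's 'for cur_city' loop: initial assignment, then the dest loop
def aCity (days flights : List (List Int)) (n week : Nat) (dp : List (List Int)) (c : Nat) : List (List Int) :=
  aInner days flights week (week % 2) ((week + 1) % 2) c
    (dp.set (week % 2) ((dp.getD (week % 2) []).set c
      ((days.getD c []).getD week 0 + (dp.getD ((week + 1) % 2) []).getD c 0)))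
    (List.range n)

-- body of A's 'for week' loop: the cur_city loop
def aWeek (days flights : List (List Int)) (n : Nat) (dp : List (List Int)) (week : Nat) : List (List Int) :=
  List.foldl (aCity days flights n week) dp (List.range n)

def min_travel_cost (days : List (List Int)) (flights : List (List Int)) : Int :=
  let n := days.length
  let w := days.headI.length          -- len(days[0]); Pre_ guarantees days ≠ []
  -- dp = [[0]*n, [0]*n]; for week in range(w-1, -1, -1): … ; the reversed range is [w-1, …, 0]
  let dpF := List.foldl (aWeek days flights n)
      [List.replicate n 0, List.replicate n 0] ((List.range w).reverse)
  (dpF.getD 0 []).getD 0 0            -- dp[0][0]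

-- ===== PORT B =====
-- value of B's comprehension cell: max([days[c][week]+nxt[c]] + [days[d][week]+nxt[d] for d … if flights[c][d]==1]);
-- Python's max over the nonempty list is ported as foldl max over its head and tail
def bCell (days flights : List (List Int)) (n week : Nat) (nxt : List Int) (c : Nat) : Int :=
  List.foldl max ((days.getD c []).getD week 0 + nxt.getD c 0)
    ((List.range n).filterMap (fun d =>
      if (flights.getD c []).getD d 0 == 1 then
        some ((days.getD d []).getD week 0 + nxt.getD d 0)
      else none))

-- B's recursive solve(week): the row of best values for every city from this week on
def bRow (days flights : List (List Int)) (n W week : Nat) : List Int :=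
  if week < W then
    (List.range n).map (bCell days flights n week (bRow days flights n W (week + 1)))
  else List.replicate n 0
termination_by W - week

def min_travel_cost_alt (days : List (List Int)) (flights : List (List Int)) : Int :=
  (bRow days flights days.length days.headI.length 0).getD 0 0   -- solve(0)[0]

-- ===== PRECONDITION & SPEC =====
-- Exactly the inputs on which Python A returns (outside it A raises IndexError):
-- days nonempty, and if there is at least one week, every days row covers all weeks and
-- flights has an n×n block for the n cities.
def Pre_min_travel_cost (days : List (List Int)) (flights : List (List Int)) : Prop :=
  days ≠ [] ∧ (days.headI.length ≠ 0 →
    ((∀ r ∈ days, days.headI.length ≤ r.length) ∧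
     days.length ≤ flights.length ∧
     (∀ r ∈ flights.take days.length, days.length ≤ r.length)))
instance (days : List (List Int)) (flights : List (List Int)) : Decidable (Pre_min_travel_cost days flights) := by unfold Pre_min_travel_cost; infer_instance

def pvWitness_min_travel_cost : List (List Int) × List (List Int) :=
  ([[3, 1], [2, 5]], [[0, 1], [1, 0]])

def Spec_min_travel_cost (days : List (List Int)) (flights : List (List Int)) (out : Int) : Prop := out = min_travel_cost_alt days flights
instance (days : List (List Int)) (flights : List (List Int)) (out : Int) : Decidable (Spec_min_travel_cost days flights out) := by unfold Spec_min_travel_cost; infer_instance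

-- ===== CLAIM (what is proved, stated in full; the proofs are below) =====
def Claim_equal_min_travel_cost : Prop := ∀ (days : List (List Int)) (flights : List (List Int)), Dom_min_travel_cost days flights → Pre_min_travel_cost days flights → Spec_min_travel_cost days flights (min_travel_cost days flights)

-- ===== LEMMAS AND PROOFS =====

-- the two rows A's dp holds after the weeks down to k have been processed
def pairFor (days flights : List (List Int)) (n W k : Nat) : List (List Int) :=
  if k % 2 = 0 then
    [bRow days flights n W k, bRow days flights n W (k + 1)]
  else
    [bRow days flights n W (k + 1), bRow days flights n W k]

theorem bRow_length (days flights : List (List Int)) (n W week : Nat) :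
    (bRow days flights n W week).length = n := by
  unfold bRow; split <;> simp

theorem inner_eq0 (days flights : List (List Int)) (week c : Nat) (b : List Int) :
    ∀ (l : List Nat) (a : List Int), c < a.length →
      aInner days flights week 0 1 c [a, b] l
        = [a.set c (List.foldl max (a.getD c 0) (l.filterMap (fun d =>
            if (flights.getD c []).getD d 0 == 1 then
              some ((days.getD d []).getD week 0 + b.getD d 0)
            else none))), b] := by
  intro l
  induction l with
  | nil =>
    intro a hc
    show [a, b] = _
    rw [List.filterMap_nil, List.foldl_nil, List.getD_eq_getElem _ _ hc, List.set_getElem_self]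
  | cons d l ih =>
    intro a hc
    by_cases hfl : ((flights.getD c []).getD d 0 == 1) = true
    · have hstep : aInner days flights week 0 1 c [a, b] (d :: l)
          = aInner days flights week 0 1 c
              [a.set c (max (a.getD c 0) ((days.getD d []).getD week 0 + b.getD d 0)), b] l := by
        simp only [aInner, List.foldl_cons]
        congr 1
        rw [if_pos hfl]
        rfl
      rw [hstep, ih _ (by simpa using hc), List.set_set,
        List.getD_eq_getElem _ _ (by simpa using hc : c < (a.set c _).length),
        List.getElem_set_self,
        List.filterMap_cons_some (by rw [if_pos hfl]), List.foldl_cons]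
    · have hstep : aInner days flights week 0 1 c [a, b] (d :: l)
          = aInner days flights week 0 1 c [a, b] l := by
        simp only [aInner, List.foldl_cons]
        congr 1
        rw [if_neg hfl]
      rw [hstep, ih _ hc, List.filterMap_cons_none (by rw [if_neg hfl])]

theorem inner_eq1 (days flights : List (List Int)) (week c : Nat) (a : List Int) :
    ∀ (l : List Nat) (b : List Int), c < b.length →
      aInner days flights week 1 0 c [a, b] l
        = [a, b.set c (List.foldl max (b.getD c 0) (l.filterMap (fun d =>
            if (flights.getD c []).getD d 0 == 1 then
              some ((days.getD d []).getD week 0 + a.getD d 0)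
            else none)))] := by
  intro l
  induction l with
  | nil =>
    intro b hc
    show [a, b] = _
    rw [List.filterMap_nil, List.foldl_nil, List.getD_eq_getElem _ _ hc, List.set_getElem_self]
  | cons d l ih =>
    intro b hc
    by_cases hfl : ((flights.getD c []).getD d 0 == 1) = true
    · have hstep : aInner days flights week 1 0 c [a, b] (d :: l)
          = aInner days flights week 1 0 c
              [a, b.set c (max (b.getD c 0) ((days.getD d []).getD week 0 + a.getD d 0))] l := by
        simp only [aInner, List.foldl_cons]
        congr 1
        rw [if_pos hfl]
        rfl
      rw [hstep, ih _ (by simpa using hc), List.set_set,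
        List.getD_eq_getElem _ _ (by simpa using hc : c < (b.set c _).length),
        List.getElem_set_self,
        List.filterMap_cons_some (by rw [if_pos hfl]), List.foldl_cons]
    · have hstep : aInner days flights week 1 0 c [a, b] (d :: l)
          = aInner days flights week 1 0 c [a, b] l := by
        simp only [aInner, List.foldl_cons]
        congr 1
        rw [if_neg hfl]
      rw [hstep, ih _ hc, List.filterMap_cons_none (by rw [if_neg hfl])]

theorem city_eq0 (days flights : List (List Int)) (n week c : Nat) (a b : List Int)
    (hw : week % 2 = 0) (hc : c < a.length) :
    aCity days flights n week [a, b] c = [a.set c (bCell days flights n week b c), b] := by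
  have hw1 : (week + 1) % 2 = 1 := by omega
  unfold aCity
  rw [hw, hw1]
  show aInner days flights week 0 1 c
      [a.set c ((days.getD c []).getD week 0 + b.getD c 0), b] (List.range n) = _
  rw [inner_eq0 days flights week c b _ _ (by simpa using hc), List.set_set,
    List.getD_eq_getElem _ _ (by simpa using hc : c < (a.set c _).length),
    List.getElem_set_self]
  rfl

theorem city_eq1 (days flights : List (List Int)) (n week c : Nat) (a b : List Int)
    (hw : week % 2 = 1) (hc : c < b.length) :
    aCity days flights n week [a, b] c = [a, b.set c (bCell days flights n week a c)] := by
  have hw1 : (week + 1) % 2 = 0 := by omega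
  unfold aCity
  rw [hw, hw1]
  show aInner days flights week 1 0 c
      [a, b.set c ((days.getD c []).getD week 0 + a.getD c 0)] (List.range n) = _
  rw [inner_eq1 days flights week c a _ _ (by simpa using hc), List.set_set,
    List.getD_eq_getElem _ _ (by simpa using hc : c < (b.set c _).length),
    List.getElem_set_self]
  rfl

theorem cityfold0 (days flights : List (List Int)) (n week : Nat) (b : List Int)
    (hw : week % 2 = 0) :
    ∀ (m : Nat) (a : List Int), m ≤ a.length →
      List.foldl (aCity days flights n week) [a, b] (List.range m)
        = [(List.range m).map (bCell days flights n week b) ++ a.drop m, b] := by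
  intro m
  induction m with
  | zero => intro a _; simp
  | succ m ih =>
    intro a hm
    rw [List.range_succ, List.foldl_append, ih a (by omega)]
    simp only [List.foldl_cons, List.foldl_nil]
    have hlen : ((List.range m).map (bCell days flights n week b) ++ a.drop m).length = a.length := by
      simp; omega
    rw [city_eq0 days flights n week m _ _ hw (by omega)]
    have hdrop : a.drop m = a[m] :: a.drop (m + 1) := (List.getElem_cons_drop (by omega)).symm
    rw [List.set_append_right _ _ (by simp)]
    simp only [List.length_map, List.length_range, Nat.sub_self]
    rw [List.map_append, List.append_assoc, hdrop]
    rfl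

theorem cityfold1 (days flights : List (List Int)) (n week : Nat) (a : List Int)
    (hw : week % 2 = 1) :
    ∀ (m : Nat) (b : List Int), m ≤ b.length →
      List.foldl (aCity days flights n week) [a, b] (List.range m)
        = [a, (List.range m).map (bCell days flights n week a) ++ b.drop m] := by
  intro m
  induction m with
  | zero => intro b _; simp
  | succ m ih =>
    intro b hm
    rw [List.range_succ, List.foldl_append, ih b (by omega)]
    simp only [List.foldl_cons, List.foldl_nil]
    have hlen : ((List.range m).map (bCell days flights n week a) ++ b.drop m).length = b.length := by
      simp; omega
    rw [city_eq1 days flights n week m _ _ hw (by omega)]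
    have hdrop : b.drop m = b[m] :: b.drop (m + 1) := (List.getElem_cons_drop (by omega)).symm
    rw [List.set_append_right _ _ (by simp)]
    simp only [List.length_map, List.length_range, Nat.sub_self]
    rw [List.map_append, List.append_assoc, hdrop]
    rfl

theorem week_eq0 (days flights : List (List Int)) (n week : Nat) (a b : List Int)
    (hw : week % 2 = 0) (ha : a.length = n) :
    aWeek days flights n [a, b] week = [(List.range n).map (bCell days flights n week b), b] := by
  unfold aWeek
  rw [cityfold0 days flights n week b hw n a (by omega)]
  simp [List.drop_of_length_le (by omega : a.length ≤ n)]

theorem week_eq1 (days flights : List (List Int)) (n week : Nat) (a b : List Int)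
    (hw : week % 2 = 1) (hb : b.length = n) :
    aWeek days flights n [a, b] week = [a, (List.range n).map (bCell days flights n week a)] := by
  unfold aWeek
  rw [cityfold1 days flights n week a hw n b (by omega)]
  simp [List.drop_of_length_le (by omega : b.length ≤ n)]

theorem bRow_unfold_lt (days flights : List (List Int)) (n W k : Nat) (h : k < W) :
    bRow days flights n W k
      = (List.range n).map (bCell days flights n k (bRow days flights n W (k + 1))) := by
  rw [bRow]; simp [h]

theorem bRow_unfold_ge (days flights : List (List Int)) (n W k : Nat) (h : ¬ k < W) :
    bRow days flights n W k = List.replicate n 0 := by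
  rw [bRow]; simp [h]

theorem loop_inv (days flights : List (List Int)) (n W : Nat) :
    ∀ (m k : Nat), k ≤ W → W - k = m →
      List.foldl (aWeek days flights n)
          [List.replicate n 0, List.replicate n 0] ((List.range' k m).reverse)
        = pairFor days flights n W k := by
  intro m
  induction m with
  | zero =>
    intro k hk hm
    have hkW : k = W := by omega
    subst hkW
    simp [pairFor, bRow_unfold_ge days flights n _ _ (by omega : ¬ k < k),
      bRow_unfold_ge days flights n _ _ (by omega : ¬ k + 1 < k)]
  | succ m ih =>
    intro k hk hm
    have hkW : k < W := by omega
    rw [List.range'_succ, List.reverse_cons, List.foldl_append,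
      ih (k + 1) (by omega) (by omega)]
    simp only [List.foldl_cons, List.foldl_nil]
    rcases Nat.even_or_odd k with he | ho
    · have hk0 : k % 2 = 0 := Nat.even_iff.mp he
      have hk1 : (k + 1) % 2 = 1 := by omega
      rw [pairFor, if_neg (by omega)]
      rw [week_eq0 days flights n k _ _ hk0 (bRow_length days flights n W (k + 2))]
      rw [pairFor, if_pos hk0, ← bRow_unfold_lt days flights n W k hkW]
    · have hk1 : k % 2 = 1 := Nat.odd_iff.mp ho
      have hk0 : (k + 1) % 2 = 0 := by omega
      rw [pairFor, if_pos hk0]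
      rw [week_eq1 days flights n k _ _ hk1 (bRow_length days flights n W (k + 2))]
      rw [pairFor, if_neg (by omega), ← bRow_unfold_lt days flights n W k hkW]

theorem main_eq (days flights : List (List Int)) :
    min_travel_cost days flights = min_travel_cost_alt days flights := by
  have h := loop_inv days flights days.length days.headI.length
      days.headI.length 0 (by omega) (by omega)
  show ((List.foldl (aWeek days flights days.length)
      [List.replicate days.length 0, List.replicate days.length 0]
      ((List.range days.headI.length).reverse)).getD 0 []).getD 0 0
    = (bRow days flights days.length days.headI.length 0).getD 0 0
  rw [List.range_eq_range', h]
  rfl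

-- ===== VERDICT (by name: the statement is the Claim_ definition above) =====
theorem min_travel_cost_spec : Claim_equal_min_travel_cost := by
  intro days flights _ _
  unfold Spec_min_travel_cost
  exact main_eq days flights
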